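-- pv_equiv track=rewrite | github.com/Shashank-Mittal/Updated-News-GUI-with-API | projectco.py | Emailcheck
-- ===== SOURCE A (Python) =====
-- def Emailcheck(Echeck):
-- 	p=False
-- 	for i in Echeck:
-- 		if(i=='@' or p==True):
-- 			p=True
-- 			if(i=="."):
-- 				return False
-- 	return True
-- ===== SOURCE B (Python) =====
-- def Emailcheck(Echeck):
--     if '@' not in Echeck:
--         return True
--     return '.' not in Echeck[Echeck.index('@') + 1:]
-- ===== Notes on version B (the rewrite author's own statement) =====
-- stated objective: idiomatic
-- what changed: Replaces the flag-threaded single-pass character scan with a locate-then-test decomposition: find the first '@' and check the suffix after it for a dot via membership/index/slice (C-level string operations instead of a per-character Python loop).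
import Mathlib
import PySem

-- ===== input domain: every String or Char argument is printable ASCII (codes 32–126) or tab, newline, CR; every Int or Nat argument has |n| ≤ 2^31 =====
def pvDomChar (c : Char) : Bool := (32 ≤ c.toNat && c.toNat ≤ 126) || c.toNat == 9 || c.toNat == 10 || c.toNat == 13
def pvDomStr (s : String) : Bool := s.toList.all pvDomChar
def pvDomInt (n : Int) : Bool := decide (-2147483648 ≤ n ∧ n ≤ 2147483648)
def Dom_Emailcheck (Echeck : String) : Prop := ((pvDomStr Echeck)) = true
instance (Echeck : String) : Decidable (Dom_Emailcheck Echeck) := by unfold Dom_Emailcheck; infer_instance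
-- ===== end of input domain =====

-- B replaces A's flag-threaded single pass by locating the first '@' and testing the suffix after it for '.' (idiomatic decomposition; same cost).

-- ===== PORT A =====
-- the for-loop with the boolean flag p and the early 'return False'
def emailLoopA : List Char → Bool → Bool
  | [], _ => true
  | c :: rest, p =>
    if c = '@' || p then
      if c = '.' then false else emailLoopA rest true
    else emailLoopA rest p

def Emailcheck (Echeck : String) : Bool := emailLoopA Echeck.toList false

-- ===== PORT B =====
def Emailcheck_alt (Echeck : String) : Bool :=
  match PySem.List.index? Echeck.toList '@' with
  | none => true
  | some i => !((PySem.List.slice Echeck.toList (some ((i : Int) + 1)) none).contains '.')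

-- ===== PRECONDITION & SPEC =====
def Spec_Emailcheck (Echeck : String) (out : Bool) : Prop := out = Emailcheck_alt Echeck
instance (Echeck : String) (out : Bool) : Decidable (Spec_Emailcheck Echeck out) := by unfold Spec_Emailcheck; infer_instance

-- ===== CLAIM (what is proved, stated in full; the proofs are below) =====
def Claim_equal_Emailcheck : Prop := ∀ (Echeck : String), Dom_Emailcheck Echeck → Spec_Emailcheck Echeck (Emailcheck Echeck)

-- ===== LEMMAS AND PROOFS =====

-- once the flag is set, A just scans the rest of the string for '.'
theorem emailLoopA_true (l : List Char) : emailLoopA l true = !l.contains '.' := by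
  induction l with
  | nil => rfl
  | cons c rest ih =>
    simp only [emailLoopA, Bool.or_true, if_true, List.contains_cons]
    by_cases h : c = '.'
    · simp [h]
    · simp [h, ih, Ne.symm h]

theorem emailLoopA_false_eq (l : List Char) :
    emailLoopA l false =
      (match PySem.List.index? l '@' with
       | none => true
       | some i => !((PySem.List.slice l (some ((i : Int) + 1)) none).contains '.')) := by
  induction l with
  | nil => rfl
  | cons c rest ih =>
    by_cases h : c = '@'
    · subst h
      rw [PySem.List.index?_cons_self]
      have h1 : ((0 : Nat) : Int) + 1 = ((1 : Nat) : Int) := by norm_num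
      simp only [emailLoopA, decide_true, Bool.true_or, if_true]
      rw [emailLoopA_true, h1, PySem.List.slice_from_natCast]
      simp
    · rw [PySem.List.index?_cons_of_ne rest h]
      simp only [emailLoopA, h, decide_false, Bool.false_or, ih]
      cases hidx : PySem.List.index? rest '@' with
      | none => simp
      | some i =>
        simp only [Option.map_some]
        have h2 : ((i + 1 : Nat) : Int) + 1 = ((i + 2 : Nat) : Int) := by push_cast; ring
        have h3 : ((i : Nat) : Int) + 1 = ((i + 1 : Nat) : Int) := by push_cast; ring
        rw [h2, h3, PySem.List.slice_from_natCast, PySem.List.slice_from_natCast]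
        simp

-- ===== VERDICT (by name: the statement is the Claim_ definition above) =====
theorem Emailcheck_spec : Claim_equal_Emailcheck := by
  intro E _
  unfold Spec_Emailcheck Emailcheck Emailcheck_alt
  exact emailLoopA_false_eq E.toList
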